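-- pv_equiv track=rewrite | github.com/sp9028/P1 | Rešitve starih izpitov/8.8.1.py | roboti
-- ===== SOURCE A (Python) =====
-- def roboti(navodila, n):
--     nov = list(navodila)
-- # Tako spremenimo string to char array
--     vsi_roboti = {}
--     for i in range(n):
--         robot = Robot()
--         vsi_roboti[robot] = (0,0)
--     while nov:
--         for robot in vsi_roboti:
--             if nov[0] == 'J':
--                 vsi_roboti[robot] = vsi_roboti[robot][0],vsi_roboti[robot][1] - 1
--             elif nov[0] == 'S':
--                 vsi_roboti[robot] = vsi_roboti[robot][0],vsi_roboti[robot][1] + 1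
--             elif nov[0] == 'V':
--                 vsi_roboti[robot] = vsi_roboti[robot][0] + 1,vsi_roboti[robot][1]
--             else:
--                 vsi_roboti[robot] = vsi_roboti[robot][0] - 1,vsi_roboti[robot][1]
--             del nov[0]
--             if not nov:
--                 break
--     return [koord for koord in vsi_roboti.values()]
--
-- class Robot:
--     def __init__(self):
--         self.x = self.y = 0
--         self.smer = 1
--
--     def desno(self):
--         self.smer = (self.smer + 1) % 4
--
--     def levo(self):
--         self.smer = (self.smer - 1) % 4
--
--     def naprej(self, d):
--         if self.smer == 0:
--             self.y += d
--         elif self.smer == 1: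
--             self.x += d
--         elif self.smer == 2:
--             self.y -= d
--         else:
--             self.x -= d
--
--     def koordinate(self):
--         return self.x, self.y
--
--     def razdalja(self):
--         return abs(self.x) + abs(self.y)
-- ===== SOURCE B (Python) =====
-- def roboti(navodila, n):
--     if n <= 0:
--         return []
--     xs = [0] * n
--     ys = [0] * n
--     for i, c in enumerate(navodila):
--         j = i % n
--         if c == 'J':
--             ys[j] = ys[j] - 1
--         elif c == 'S':
--             ys[j] = ys[j] + 1
--         elif c == 'V':
--             xs[j] = xs[j] + 1
--         else:
--             xs[j] = xs[j] - 1
--     return list(zip(xs, ys))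
-- ===== Notes on version B (the rewrite author's own statement) =====
-- stated objective: faster
-- what changed: Replaces the nested while/for loop that repeatedly deletes navodila[0] (O(len) per deletion) and a dict keyed by dummy Robot objects with a single pass over the string that adds each instruction's displacement to coordinate arrays at index i % n.
import Mathlib
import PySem

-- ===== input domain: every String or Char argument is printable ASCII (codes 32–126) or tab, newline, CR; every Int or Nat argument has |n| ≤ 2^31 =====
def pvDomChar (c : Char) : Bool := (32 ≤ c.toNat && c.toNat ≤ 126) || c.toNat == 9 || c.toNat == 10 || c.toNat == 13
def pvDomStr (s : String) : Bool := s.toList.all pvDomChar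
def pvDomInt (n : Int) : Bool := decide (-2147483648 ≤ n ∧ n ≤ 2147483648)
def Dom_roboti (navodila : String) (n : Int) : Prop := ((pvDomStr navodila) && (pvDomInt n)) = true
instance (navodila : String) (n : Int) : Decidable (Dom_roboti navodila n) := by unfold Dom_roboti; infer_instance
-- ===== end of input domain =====

-- B replaces A's quadratic consume-the-list round-robin loop by one pass assigning
-- instruction i to robot i % n (asymptotically faster).

-- ===== PORT A =====

-- one instruction applied to one robot's coordinates (the if/elif chain of A's inner loop)
def robotiStep (c : Char) (p : Int × Int) : Int × Int :=
  if c = 'J' then (p.1, p.2 - 1)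
  else if c = 'S' then (p.1, p.2 + 1)
  else if c = 'V' then (p.1 + 1, p.2)
  else (p.1 - 1, p.2)

-- the 'for robot in vsi_roboti' loop: robots front-to-back, each consumes nov[0];
-- break when nov becomes empty. Returns (updated robots, remaining nov).
def robotiInner : List Char → List (Int × Int) → (List (Int × Int) × List Char)
  | nov, [] => ([], nov)
  | [], r :: rs => (r :: rs, [])
  | c :: rest, r :: rs =>
      let r' := robotiStep c r
      if rest.isEmpty then (r' :: rs, [])
      else
        let p := robotiInner rest rs
        (r' :: p.1, p.2)

-- proof-side form of one chunk (also used to justify termination of the while loop)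
def robotiApply : List Char → List (Int × Int) → List (Int × Int)
  | _, [] => []
  | [], r :: rs => r :: rs
  | c :: cs, r :: rs => robotiStep c r :: robotiApply cs rs

theorem robotiInner_eq : ∀ (cs : List Char) (rs : List (Int × Int)),
    robotiInner cs rs = (robotiApply cs rs, cs.drop rs.length) := by
  intro cs rs
  induction rs generalizing cs with
  | nil => cases cs <;> simp [robotiInner, robotiApply]
  | cons r rs ih =>
    cases cs with
    | nil => simp [robotiInner, robotiApply]
    | cons c rest =>
      by_cases h : rest = []
      · subst h
        cases rs <;> simp [robotiInner, robotiApply]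
      · simp [robotiInner, List.isEmpty_iff, h, ih, robotiApply]

-- the 'while nov:' loop; if the dict is empty (n ≤ 0) Python loops forever —
-- those inputs are outside Pre_roboti, here we just return the state.
def robotiOuter : List Char → List (Int × Int) → List (Int × Int)
  | [], rs => rs
  | c :: cs, rs =>
      if h : rs = [] then rs
      else
        let p := robotiInner (c :: cs) rs
        robotiOuter p.2 p.1
termination_by cs _ => cs.length
decreasing_by
  simp only [robotiInner_eq, List.length_drop, List.length_cons]
  cases rs with
  | nil => exact absurd rfl h
  | cons a as => simp

def roboti (navodila : String) (n : Int) : List (Int × Int) :=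
  let nov := navodila.toList
  -- for i in range(n): dict gains one fresh Robot key with value (0,0); values() in insertion order
  let vsiRoboti := (PySem.List.pyRange 0 n 1).map (fun _ => ((0 : Int), (0 : Int)))
  robotiOuter nov vsiRoboti

-- ===== PORT B =====

-- the 'for i, c in enumerate(navodila)' loop over the two arrays xs, ys
def robotiBLoop (m : Nat) : Nat → List Char → List Int × List Int → List Int × List Int
  | _, [], st => st
  | i, c :: cs, (xs, ys) =>
      let j := i % m
      robotiBLoop m (i + 1) cs
        (if c = 'J' then (xs, ys.modify j (· - 1))
         else if c = 'S' then (xs, ys.modify j (· + 1))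
         else if c = 'V' then (xs.modify j (· + 1), ys)
         else (xs.modify j (· - 1), ys))

def roboti_alt (navodila : String) (n : Int) : List (Int × Int) :=
  if n ≤ 0 then []
  else
    let m := n.toNat
    let st := robotiBLoop m 0 navodila.toList (List.replicate m 0, List.replicate m 0)
    st.1.zip st.2

-- ===== PRECONDITION & SPEC =====
-- Pre_ excludes n ≤ 0 with nonempty navodila: there A's robot dict is empty and the
-- 'while nov:' loop never consumes anything, so A loops forever (no value returned).
def Pre_roboti (navodila : String) (n : Int) : Prop := 0 < n ∨ navodila = ""
instance (navodila : String) (n : Int) : Decidable (Pre_roboti navodila n) := by unfold Pre_roboti; infer_instance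

def pvWitness_roboti : String × Int := ("JSVZJ", 2)

def Spec_roboti (navodila : String) (n : Int) (out : List (Int × Int)) : Prop := out = roboti_alt navodila n
instance (navodila : String) (n : Int) (out : List (Int × Int)) : Decidable (Spec_roboti navodila n out) := by unfold Spec_roboti; infer_instance

-- ===== CLAIM (what is proved, stated in full; the proofs are below) =====
def Claim_equal_roboti : Prop := ∀ (navodila : String) (n : Int), Dom_roboti navodila n → Pre_roboti navodila n → Spec_roboti navodila n (roboti navodila n)

-- ===== LEMMAS AND PROOFS =====

-- round-robin reference: done = robots already served this round, todo = still waiting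
def robotiRR : List Char → List (Int × Int) → List (Int × Int) → List (Int × Int)
  | [], done, todo => done ++ todo
  | c :: cs, done, t :: ts => robotiRR cs (done ++ [robotiStep c t]) ts
  | c :: cs, d :: ds, [] => robotiRR (c :: cs) [] (d :: ds)
  | _ :: _, [], [] => []
termination_by cs _ todo => 2 * cs.length + (if todo = [] then 1 else 0)
decreasing_by
  all_goals simp
  split <;> omega

theorem robotiApply_length : ∀ (cs : List Char) (rs : List (Int × Int)),
    (robotiApply cs rs).length = rs.length := by
  intro cs rs
  induction rs generalizing cs with
  | nil => cases cs <;> simp [robotiApply]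
  | cons r rs ih => cases cs <;> simp [robotiApply, ih]

theorem robotiRR_chunk : ∀ (todo : List (Int × Int)) (cs : List Char) (done : List (Int × Int)),
    done ++ todo ≠ [] →
    robotiRR cs done todo = robotiRR (cs.drop todo.length) [] (done ++ robotiApply cs todo) := by
  intro todo
  induction todo with
  | nil =>
    intro cs done h
    cases cs with
    | nil => simp [robotiRR, robotiApply]
    | cons c cs' =>
      cases done with
      | nil => simp at h
      | cons d ds => simp [robotiRR, robotiApply]
  | cons t ts ih =>
    intro cs done h
    cases cs with
    | nil => simp [robotiRR, robotiApply]
    | cons c cs' =>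
      have h' : (done ++ [robotiStep c t]) ++ ts ≠ [] := by simp
      calc robotiRR (c :: cs') done (t :: ts)
          = robotiRR cs' (done ++ [robotiStep c t]) ts := by simp [robotiRR]
        _ = robotiRR (cs'.drop ts.length) [] ((done ++ [robotiStep c t]) ++ robotiApply cs' ts) := ih cs' _ h'
        _ = robotiRR ((c :: cs').drop (t :: ts).length) [] (done ++ robotiApply (c :: cs') (t :: ts)) := by
              simp [robotiApply]

-- A's while loop equals the round-robin reference (fuel induction on the instruction list length)
theorem robotiOuter_RR_aux : ∀ (k : Nat) (cs : List Char) (rs : List (Int × Int)),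
    cs.length ≤ k → rs ≠ [] → robotiOuter cs rs = robotiRR cs [] rs := by
  intro k
  induction k with
  | zero =>
    intro cs rs hk hrs
    have : cs = [] := by cases cs <;> simp_all
    subst this
    simp [robotiOuter.eq_def, robotiRR]
  | succ k ih =>
    intro cs rs hk hrs
    cases cs with
    | nil => simp [robotiOuter.eq_def, robotiRR]
    | cons c cs' =>
      have hstep : robotiOuter (c :: cs') rs
          = robotiOuter ((c :: cs').drop rs.length) (robotiApply (c :: cs') rs) := by
        rw [robotiOuter.eq_def]
        simp [hrs, robotiInner_eq]
      rw [hstep, robotiRR_chunk rs (c :: cs') [] (by simpa using hrs)]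
      have hlen : ((c :: cs').drop rs.length).length ≤ k := by
        have h1 : rs.length ≥ 1 := by cases rs <;> simp_all
        simp only [List.length_drop, List.length_cons] at *
        omega
      have hne : robotiApply (c :: cs') rs ≠ [] := by
        intro hcon
        have := robotiApply_length (c :: cs') rs
        rw [hcon] at this
        cases rs <;> simp_all
      simpa using ih _ _ hlen hne

-- zip commutes with a modify on either component
theorem zip_modify_right : ∀ (xs : List Int) (ys : List Int) (j : Nat) (f : Int → Int),
    xs.zip (ys.modify j f) = (xs.zip ys).modify j (fun p => (p.1, f p.2)) := by
  intro xs
  induction xs with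
  | nil => simp
  | cons x xs ih =>
    intro ys j f
    cases ys with
    | nil => simp
    | cons y ys => cases j <;> simp [List.modify_cons, ih]

theorem zip_modify_left : ∀ (xs : List Int) (ys : List Int) (j : Nat) (f : Int → Int),
    (xs.modify j f).zip ys = (xs.zip ys).modify j (fun p => (f p.1, p.2)) := by
  intro xs
  induction xs with
  | nil => simp
  | cons x xs ih =>
    intro ys j f
    cases ys with
    | nil => simp
    | cons y ys => cases j <;> simp [List.modify_cons, ih]

-- B's two-array loop, seen through zip, is a single-list modify loop
def robotiPairLoop (m : Nat) : Nat → List Char → List (Int × Int) → List (Int × Int)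
  | _, [], rs => rs
  | i, c :: cs, rs => robotiPairLoop m (i + 1) cs (rs.modify (i % m) (robotiStep c))

theorem robotiBLoop_zip : ∀ (m : Nat) (cs : List Char) (i : Nat) (xs ys : List Int),
    (robotiBLoop m i cs (xs, ys)).1.zip (robotiBLoop m i cs (xs, ys)).2
      = robotiPairLoop m i cs (xs.zip ys) := by
  intro m cs
  induction cs with
  | nil => intro i xs ys; simp [robotiBLoop, robotiPairLoop]
  | cons c cs ih =>
    intro i xs ys
    by_cases hJ : c = 'J'
    · subst hJ
      have hs : robotiStep 'J' = fun p : Int × Int => (p.1, p.2 - 1) := by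
        funext p; simp [robotiStep]
      simp [robotiBLoop, robotiPairLoop, ih, zip_modify_right, hs]
    · by_cases hS : c = 'S'
      · subst hS
        have hs : robotiStep 'S' = fun p : Int × Int => (p.1, p.2 + 1) := by
          funext p; simp [robotiStep]
        simp [robotiBLoop, robotiPairLoop, hJ, ih, zip_modify_right, hs]
      · by_cases hV : c = 'V'
        · subst hV
          have hs : robotiStep 'V' = fun p : Int × Int => (p.1 + 1, p.2) := by
            funext p; simp [robotiStep]
          simp [robotiBLoop, robotiPairLoop, hJ, hS, ih, zip_modify_left, hs]
        · have hs : robotiStep c = fun p : Int × Int => (p.1 - 1, p.2) := by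
            funext p; simp [robotiStep, hJ, hS, hV]
          simp [robotiBLoop, robotiPairLoop, hJ, hS, hV, ih, zip_modify_left, hs]

theorem modify_append_cons : ∀ (done : List (Int × Int)) (t : Int × Int) (ts : List (Int × Int)) (f : Int × Int → Int × Int),
    (done ++ t :: ts).modify done.length f = done ++ f t :: ts := by
  intro done
  induction done with
  | nil => simp
  | cons d ds ih => intro t ts f; simp [ih]

theorem robotiPairLoop_nil : ∀ (m : Nat) (cs : List Char) (i : Nat),
    robotiPairLoop m i cs [] = [] := by
  intro m cs
  induction cs with
  | nil => intro i; simp [robotiPairLoop]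
  | cons c cs ih => intro i; simp [robotiPairLoop, ih]

-- B's modify loop equals the round-robin reference
theorem robotiPairLoop_RR : ∀ (m : Nat) (cs : List Char) (i : Nat)
    (done todo : List (Int × Int)),
    done.length + todo.length = m → i % m = done.length →
    robotiPairLoop m i cs (done ++ todo) = robotiRR cs done todo := by
  intro m cs
  induction cs with
  | nil =>
    intro i done todo h1 h2
    simp [robotiPairLoop, robotiRR]
  | cons c cs ih =>
    intro i done todo h1 h2
    cases todo with
    | nil =>
      -- then m = done.length; i % m < m unless m = 0, so done = [] and m = 0
      simp only [List.length_nil, Nat.add_zero] at h1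
      have hm0 : m = 0 := by
        by_contra hm
        have := Nat.mod_lt i (Nat.pos_of_ne_zero hm)
        omega
      have hd : done = [] := by
        cases done <;> simp_all
      subst hd
      simp [robotiPairLoop_nil, robotiRR]
    | cons t ts =>
      have hm : 0 < m := by simp at h1; omega
      have hstep : robotiPairLoop m i (c :: cs) (done ++ t :: ts)
          = robotiPairLoop m (i + 1) cs (done ++ robotiStep c t :: ts) := by
        simp only [robotiPairLoop, h2, modify_append_cons]
      rw [hstep]
      have hRR : robotiRR (c :: cs) done (t :: ts) = robotiRR cs (done ++ [robotiStep c t]) ts := by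
        simp [robotiRR]
      rw [hRR]
      by_cases hts : done.length + 1 < m
      · have h2' : (i + 1) % m = done.length + 1 := by
          have h1m : 1 % m = 1 := Nat.mod_eq_of_lt (by omega)
          rw [Nat.add_mod, h2, h1m, Nat.mod_eq_of_lt hts]
        have := ih (i + 1) (done ++ [robotiStep c t]) ts (by simp at h1 ⊢; omega) (by simp [h2'])
        simpa using this
      · -- last robot of the round: ts = [] and (i+1) % m = 0
        have htsnil : ts = [] := by
          cases ts with
          | nil => rfl
          | cons a b => simp at h1; omega
        subst htsnil
        have hmd : done.length + 1 = m := by simp at h1; omega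
        have h2' : (i + 1) % m = 0 := by
          rcases Nat.lt_or_ge 1 m with hm2 | hm1
          · rw [Nat.add_mod, h2, Nat.mod_eq_of_lt hm2, hmd, Nat.mod_self]
          · have hm1' : m = 1 := by omega
            subst hm1'
            omega
        cases cs with
        | nil =>
          simp [robotiPairLoop, robotiRR]
        | cons c' cs' =>
          have hwrap : robotiRR (c' :: cs') (done ++ [robotiStep c t]) []
              = robotiRR (c' :: cs') [] (done ++ [robotiStep c t]) := by
            cases hdd : done ++ [robotiStep c t] with
            | nil => simp at hdd
            | cons d ds => simp [robotiRR]
          rw [hwrap]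
          have := ih (i + 1) [] (done ++ [robotiStep c t]) (by simp; omega) (by simp [h2'])
          simpa using this

-- ===== VERDICT (by name: the statement is the Claim_ definition above) =====
theorem roboti_spec : Claim_equal_roboti := by
  intro navodila n _ hpre
  unfold Spec_roboti roboti roboti_alt
  by_cases hn : n ≤ 0
  · -- Pre_ forces navodila = ""
    have hs : navodila = "" := by
      rcases hpre with h | h
      · omega
      · exact h
    subst hs
    have hm : n.toNat = 0 := by omega
    have hr : (PySem.List.pyRange 0 n 1).map (fun _ => ((0 : Int), (0 : Int))) = [] := by
      have : PySem.List.pyRange 0 n 1 = [] := by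
        simp [PySem.List.pyRange]
        omega
      simp [this]
    have hnil : "".toList = [] := by simp
    simp only [hn, if_true, hr, hnil]
    rw [robotiOuter.eq_def]
  · have hpos : 0 < n := by omega
    have hm : 0 < n.toNat := by omega
    -- initial state of A is replicate m (0,0)
    have hrange : ((PySem.List.pyRange 0 n 1).map (fun _ => ((0 : Int), (0 : Int))))
        = List.replicate n.toNat ((0 : Int), (0 : Int)) := by
      rw [List.eq_replicate_iff]
      constructor
      · simp [PySem.List.length_pyRange_one]
      · intro b hb
        simp at hb
        exact hb.2
    have hne : List.replicate n.toNat ((0 : Int), (0 : Int)) ≠ [] := by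
      simp
      omega
    have hzip : (List.replicate n.toNat (0 : Int)).zip (List.replicate n.toNat (0 : Int))
        = List.replicate n.toNat ((0 : Int), (0 : Int)) := by
      simp
    rw [hrange,
        robotiOuter_RR_aux navodila.toList.length navodila.toList _ le_rfl hne,
        ← robotiPairLoop_RR n.toNat navodila.toList 0 [] (List.replicate n.toNat ((0 : Int), (0 : Int)))
            (by simp) (by simp)]
    simp only [hn, if_false, List.nil_append]
    rw [robotiBLoop_zip, hzip]
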